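-- pv_equiv track=rewrite | github.com/whoisareg/HomeWork | tsarMard.py | solution
-- ===== SOURCE A (Python) =====
-- def solution(a):
--
--     tree_index = []
--     people = []
--
--     for i in range(len(a)):
--         if a[i] == -1:
--             tree_index.append(i)
--         else:
--             people.append(a[i])
--
--     people.sort()
--     for i in tree_index:
--         people.insert(i,-1)
--     return people
-- ===== SOURCE B (Python) =====
-- def solution(a):
--     # sort the non-(-1) values once, then one pass over a: emit -1 where the
--     # input has -1 and the next sorted value elsewhere (no positional inserts)
--     it = iter(sorted(v for v in a if v != -1))
--     return [-1 if x == -1 else next(it) for x in a]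
-- ===== Notes on version B (the rewrite author's own statement) =====
-- stated objective: alternative
-- what changed: Instead of collecting -1 positions and re-inserting -1 into the sorted list with repeated list.insert, B sorts the non-(-1) values once and does a single pass over the input, emitting -1 where the input has -1 and the next sorted value elsewhere.
import Mathlib
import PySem

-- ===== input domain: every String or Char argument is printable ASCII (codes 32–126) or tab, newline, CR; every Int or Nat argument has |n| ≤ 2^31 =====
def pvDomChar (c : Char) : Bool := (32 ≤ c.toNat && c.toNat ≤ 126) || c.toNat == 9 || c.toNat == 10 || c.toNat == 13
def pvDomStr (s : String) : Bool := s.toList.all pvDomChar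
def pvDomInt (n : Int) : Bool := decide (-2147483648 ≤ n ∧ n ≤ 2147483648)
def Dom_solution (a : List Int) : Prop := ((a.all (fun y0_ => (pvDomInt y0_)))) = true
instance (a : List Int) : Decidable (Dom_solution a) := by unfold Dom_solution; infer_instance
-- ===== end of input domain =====

-- B sorts the non-(-1) values once and fills them back in one pass over the
-- input, instead of A's repeated positional list.insert of -1 (alternative algorithm).

-- ===== PORT A =====
def solution (a : List Int) : List Int :=
  -- for i in range(len(a)): append i to tree_index or a[i] to people
  let st := (PySem.List.pyRange 0 (a.length : Int) 1).foldl
    (fun (st : List Int × List Int) i =>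
      if PySem.List.pyGetD a i 0 = -1 then (st.1 ++ [i], st.2)
      else (st.1, st.2 ++ [PySem.List.pyGetD a i 0])) ([], [])
  -- people.sort()
  let people := PySem.List.sorted st.2 (fun x => x) false
  -- for i in tree_index: people.insert(i, -1)
  st.1.foldl (fun p i => PySem.List.insert p i (-1)) people

-- ===== PORT B =====
-- the list comprehension consuming the iterator of sorted values
def fillAux : List Int → List Int → List Int
  | [], _ => []
  | x :: xs, s =>
    if x = -1 then -1 :: fillAux xs s
    else match s with
      | y :: ys => y :: fillAux xs ys
      | [] => []   -- unreachable: the sorted list has one value per non-(-1) slot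

def solution_alt (a : List Int) : List Int :=
  fillAux a (PySem.List.sorted (a.filter (fun v => v != -1)) (fun x => x) false)

-- ===== PRECONDITION & SPEC =====
def Spec_solution (a : List Int) (out : List Int) : Prop := out = solution_alt a
instance (a : List Int) (out : List Int) : Decidable (Spec_solution a out) := by unfold Spec_solution; infer_instance

-- ===== CLAIM (what is proved, stated in full; the proofs are below) =====
def Claim_equal_solution : Prop := ∀ (a : List Int), Dom_solution a → Spec_solution a (solution a)

-- ===== LEMMAS AND PROOFS =====

-- positions of the -1 entries of a, counting from c
def negIdxFrom : List Int → Int → List Int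
  | [], _ => []
  | x :: xs, c => if x = -1 then c :: negIdxFrom xs (c+1) else negIdxFrom xs (c+1)

theorem negIdxFrom_shift (a : List Int) : ∀ (c : Int),
    negIdxFrom a (c+1) = (negIdxFrom a c).map (· + 1) := by
  induction a with
  | nil => intro c; rfl
  | cons x xs ih =>
    intro c
    by_cases h : x = -1 <;> simp [negIdxFrom, h, ih (c+1), ih c]

theorem negIdxFrom_nonneg (a : List Int) : ∀ (c i : Int), i ∈ negIdxFrom a c → c ≤ i := by
  induction a with
  | nil => intro c i h; simp [negIdxFrom] at h
  | cons x xs ih =>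
    intro c i h
    by_cases hx : x = -1 <;> simp [negIdxFrom, hx] at h
    · rcases h with h | h
      · omega
      · have := ih (c+1) i h; omega
    · have := ih (c+1) i h; omega

theorem ins_succ (s : List Int) (y v : Int) (i : Int) (h : 0 ≤ i) :
    PySem.List.insert (y :: s) (i+1) v = y :: PySem.List.insert s i v := by
  have h1 : ¬ (i + 1 < 0) := by omega
  have h2 : ¬ (i < 0) := by omega
  simp only [PySem.List.insert, PySem.List.sliceIndices, if_neg h1, if_neg h2,
    show ¬((1:Int) < 0) by norm_num, if_false, List.length_cons]
  rw [show (min (i+1) ((s.length + 1 : Nat) : Int)).toNat = (min i (s.length : Int)).toNat + 1 by omega]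
  simp

theorem foldl_insert_shift (l : List Int) (hl : ∀ i ∈ l, 0 ≤ i) (y : Int) :
    ∀ (s : List Int),
    (l.map (· + 1)).foldl (fun p i => PySem.List.insert p i (-1)) (y :: s)
      = y :: l.foldl (fun p i => PySem.List.insert p i (-1)) s := by
  induction l with
  | nil => intro s; rfl
  | cons i l ih =>
    intro s
    have hi : 0 ≤ i := hl i (by simp)
    simp only [List.map_cons, List.foldl_cons, ins_succ s y (-1) i hi]
    exact ih (fun j hj => hl j (by simp [hj])) (PySem.List.insert s i (-1))

-- the first loop of A computes (positions of -1, values ≠ -1)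
theorem loop_char (a : List Int) : ∀ (c : Int) (p q : List Int),
    (List.range a.length).foldl
      (fun (st : List Int × List Int) k =>
        if a.getD k 0 = -1 then (st.1 ++ [c + (k : Int)], st.2)
        else (st.1, st.2 ++ [a.getD k 0])) (p, q)
      = (p ++ negIdxFrom a c, q ++ a.filter (fun v => v != -1)) := by
  induction a with
  | nil => intro c p q; simp [negIdxFrom]
  | cons x xs ih =>
    intro c p q
    rw [List.length_cons, List.range_succ_eq_map, List.foldl_cons, List.foldl_map]
    have hf : (fun (st : List Int × List Int) (k : Nat) =>
        if (x :: xs).getD (Nat.succ k) 0 = -1 then (st.1 ++ [c + (Nat.succ k : Int)], st.2)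
        else (st.1, st.2 ++ [(x :: xs).getD (Nat.succ k) 0]))
        = (fun (st : List Int × List Int) (k : Nat) =>
        if xs.getD k 0 = -1 then (st.1 ++ [(c+1) + (k : Int)], st.2)
        else (st.1, st.2 ++ [xs.getD k 0])) := by
      funext st k
      have : c + (Nat.succ k : Int) = (c+1) + (k : Int) := by push_cast; ring
      simp only [List.getD_cons_succ, this]
    rw [hf]
    by_cases hx : x = -1
    · rw [show (if (x :: xs).getD 0 0 = -1 then ((p, q).1 ++ [c + ((0:Nat) : Int)], (p, q).2)
          else ((p, q).1, (p, q).2 ++ [(x :: xs).getD 0 0])) = (p ++ [c], q) from by simp [hx]]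
      rw [ih (c+1) (p ++ [c]) q]
      simp [negIdxFrom, hx]
    · rw [show (if (x :: xs).getD 0 0 = -1 then ((p, q).1 ++ [c + ((0:Nat) : Int)], (p, q).2)
          else ((p, q).1, (p, q).2 ++ [(x :: xs).getD 0 0])) = (p, q ++ [x]) from by simp [hx]]
      rw [ih (c+1) p (q ++ [x])]
      have hb : (x != -1) = true := by simpa using hx
      simp [negIdxFrom, hx, hb]

-- inserting -1 at the -1 positions = one filling pass
theorem insert_eq_fill (a : List Int) : ∀ (s : List Int),
    s.length = (a.filter (fun v => v != -1)).length →
    (negIdxFrom a 0).foldl (fun p i => PySem.List.insert p i (-1)) s = fillAux a s := by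
  induction a with
  | nil =>
    intro s hs
    simp at hs
    simp [negIdxFrom, fillAux, hs]
  | cons x xs ih =>
    intro s hs
    by_cases hx : x = -1
    · have hshift : negIdxFrom xs 1 = (negIdxFrom xs 0).map (· + 1) := by
        simpa using negIdxFrom_shift xs 0
      have hlen : s.length = (xs.filter (fun v => v != -1)).length := by
        simpa [hx] using hs
      simp only [negIdxFrom, if_pos hx, List.foldl_cons, zero_add, hshift]
      rw [show PySem.List.insert s 0 (-1) = -1 :: s from by
        simp [PySem.List.insert, PySem.List.sliceIndices]]
      rw [foldl_insert_shift (negIdxFrom xs 0) (fun i hi => negIdxFrom_nonneg xs 0 i hi) (-1) s]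
      rw [ih s hlen]
      simp [fillAux, hx]
    · have hb : (x != -1) = true := by simpa using hx
      have hlen : s.length = (xs.filter (fun v => v != -1)).length + 1 := by
        simp [hb] at hs; omega
      cases s with
      | nil => simp at hlen
      | cons y ys =>
        have hys : ys.length = (xs.filter (fun v => v != -1)).length := by
          simpa using hlen
        have hshift : negIdxFrom xs 1 = (negIdxFrom xs 0).map (· + 1) := by
          simpa using negIdxFrom_shift xs 0
        simp only [negIdxFrom, if_neg hx, zero_add, hshift]
        rw [foldl_insert_shift (negIdxFrom xs 0) (fun i hi => negIdxFrom_nonneg xs 0 i hi) y ys]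
        rw [ih ys hys]
        simp [fillAux, hx]

-- ===== VERDICT (by name: the statement is the Claim_ definition above) =====
theorem solution_spec : Claim_equal_solution := by
  intro a _
  unfold Spec_solution solution solution_alt
  have hrange : (PySem.List.pyRange 0 (a.length : Int) 1)
      = (List.range a.length).map (fun k => ((k : Nat) : Int)) := by
    rw [PySem.List.pyRange_one]
    simp
  rw [hrange, List.foldl_map]
  have hstep : (fun (st : List Int × List Int) (k : Nat) =>
      if PySem.List.pyGetD a ((k : Nat) : Int) 0 = -1 then (st.1 ++ [((k : Nat) : Int)], st.2)
      else (st.1, st.2 ++ [PySem.List.pyGetD a ((k : Nat) : Int) 0]))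
      = (fun (st : List Int × List Int) (k : Nat) =>
      if a.getD k 0 = -1 then (st.1 ++ [(0:Int) + (k : Int)], st.2)
      else (st.1, st.2 ++ [a.getD k 0])) := by
    funext st k
    simp [PySem.List.pyGetD_natCast]
  rw [hstep, loop_char a 0 [] []]
  simp only [List.nil_append]
  apply insert_eq_fill
  have := PySem.List.sorted_perm (a.filter (fun v => v != -1)) (fun x => x) false
  exact this.length_eq
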